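-- pv_equiv track=rewrite | github.com/zztin/cellfree | cellfree/plot/plot_copy_number.py | sort_chromosome_names
-- ===== SOURCE A (Python) =====
-- def sort_chromosome_names(l):
--     chrom_values = []
--     for chrom in l:
--         chrom_value = None
--         chrom = chrom.replace("chr", "").upper()
--         if chrom == "X":
--             chrom_value = 99
--         elif chrom == "Y":
--             chrom_value = 100
--         elif chrom == "M" or chrom == "MT":
--             chrom_value = 101
--         elif chrom == "EBV":
--             chrom_value = 102
--         elif chrom == "MISC_ALT_CONTIGS_SCMO":
--             chrom_value = 999
--         else:
--             try:
--                 chrom_value = int(chrom)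
--             except Exception as e:
--                 chrom_value = 999 + sum((ord(x) for x in chrom))
--         chrom_values.append(chrom_value)
--
--     indices = sorted(range(len(chrom_values)), key=lambda x: chrom_values[x])
--     return [l[idx] for idx in indices]
-- ===== SOURCE B (Python) =====
-- def _chrom_key(chrom):
--     chrom = chrom.replace("chr", "").upper()
--     if chrom == "X":
--         return 99
--     if chrom == "Y":
--         return 100
--     if chrom in ("M", "MT"):
--         return 101
--     if chrom == "EBV":
--         return 102
--     if chrom == "MISC_ALT_CONTIGS_SCMO":
--         return 999
--     try:
--         return int(chrom)
--     except Exception: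
--         return 999 + sum(ord(x) for x in chrom)
--
--
-- def sort_chromosome_names(l):
--     # Bucket the names by their numeric key in a dict (each key computed once,
--     # buckets keep original order), then emit the buckets in increasing order
--     # of their distinct keys: no comparison sort of the names themselves, and
--     # ties are resolved by bucket order instead of sort stability.
--     groups = {}
--     for s in l:
--         k = _chrom_key(s)
--         if k in groups:
--             groups[k].append(s)
--         else:
--             groups[k] = [s]
--     out = []
--     for k in sorted(groups):
--         out.extend(groups[k])
--     return out
-- ===== Notes on version B (the rewrite author's own statement) =====
-- stated objective: alternative
-- what changed: Replaces A's comparison argsort of all positions (parallel key list, sorted(range) indexing into it, then gather) with a bucket pass: names are grouped by key in a dict in one sweep, and the output is the concatenation of the buckets taken in increasing order of the distinct keys, so only the distinct keys are ever sorted.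
import Mathlib
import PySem

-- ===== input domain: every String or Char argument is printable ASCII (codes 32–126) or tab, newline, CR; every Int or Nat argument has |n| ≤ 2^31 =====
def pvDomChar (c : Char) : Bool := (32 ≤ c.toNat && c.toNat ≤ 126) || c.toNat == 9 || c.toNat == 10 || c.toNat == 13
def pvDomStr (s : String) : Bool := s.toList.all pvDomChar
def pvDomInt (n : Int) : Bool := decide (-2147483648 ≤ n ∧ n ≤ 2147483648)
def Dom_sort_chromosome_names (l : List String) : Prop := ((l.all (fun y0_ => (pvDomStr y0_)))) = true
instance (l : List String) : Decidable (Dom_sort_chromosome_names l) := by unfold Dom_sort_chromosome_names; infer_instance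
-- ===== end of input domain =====

-- B replaces A's argsort pipeline (parallel key list, index sort, gather) by a bucket pass:
-- names are grouped by key in a dict, buckets emitted in increasing distinct-key order.


-- ===== PORT A =====
def sort_chromosome_names (l : List String) : List String :=
  let chrom_values : List Int := l.foldl (fun acc chrom0 =>
    let chrom := PySem.Str.upper (PySem.Str.replace chrom0 "chr" "")
    let chrom_value : Int :=
      if chrom = "X" then 99
      else if chrom = "Y" then 100
      else if chrom = "M" ∨ chrom = "MT" then 101
      else if chrom = "EBV" then 102
      else if chrom = "MISC_ALT_CONTIGS_SCMO" then 999
      else match PySem.Int.ofStr? chrom with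
        | some v => v
        | none => 999 + (chrom.toList.map (fun c => (c.toNat : Int))).sum
    acc ++ [chrom_value]) []
  -- indices in range(len(chrom_values)) are always valid, so pyGetD with a default is exact here
  let indices := PySem.List.sorted (PySem.List.pyRange 0 (PySem.List.len chrom_values))
      (fun x => PySem.List.pyGetD chrom_values x 0)
  indices.map (fun idx => PySem.List.pyGetD l idx "")

-- ===== PORT B =====
def chrom_key (chrom0 : String) : Int :=
  let chrom := PySem.Str.upper (PySem.Str.replace chrom0 "chr" "")
  if chrom = "X" then 99
  else if chrom = "Y" then 100
  else if chrom = "M" ∨ chrom = "MT" then 101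
  else if chrom = "EBV" then 102
  else if chrom = "MISC_ALT_CONTIGS_SCMO" then 999
  else match PySem.Int.ofStr? chrom with
    | some v => v
    | none => 999 + (chrom.toList.map (fun c => (c.toNat : Int))).sum

-- Source B's grouping loop body: one key computation, append to the key's bucket (new bucket if absent)
def bucket_step (d : PySem.Dict Int (List String)) (s : String) : PySem.Dict Int (List String) :=
  let k := chrom_key s
  if d.contains k then d.insert k (d.getD k [] ++ [s]) else d.insert k [s]

def sort_chromosome_names_alt (l : List String) : List String :=
  let groups := l.foldl bucket_step PySem.Dict.empty
  -- every k iterated below is a key of groups, so Source B's groups[k] never raises; getD is exact here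
  (PySem.List.sorted groups.keys (fun k => k)).foldl (fun out k => out ++ groups.getD k []) []

-- ===== PRECONDITION & SPEC =====
def Spec_sort_chromosome_names (l : List String) (out : List String) : Prop := out = sort_chromosome_names_alt l
instance (l : List String) (out : List String) : Decidable (Spec_sort_chromosome_names l out) := by unfold Spec_sort_chromosome_names; infer_instance

-- ===== CLAIM (what is proved, stated in full; the proofs are below) =====
def Claim_equal_sort_chromosome_names : Prop := ∀ (l : List String), Dom_sort_chromosome_names l → Spec_sort_chromosome_names l (sort_chromosome_names l)

-- ===== LEMMAS AND PROOFS =====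

-- mapping a gather function h over an insertion commutes when the index key g agrees with k ∘ h
theorem map_insertBy {α : Type} (g : Int → Int) (k : α → Int) (h : Int → α)
    (x : Int) (ys : List Int) (hx : ∀ a, a = x ∨ a ∈ ys → g a = k (h a)) :
    (PySem.List.insertBy (fun a b => decide (g a < g b)) x ys).map h
      = PySem.List.insertBy (fun a b => decide (k a < k b)) (h x) (ys.map h) := by
  induction ys with
  | nil => simp [PySem.List.insertBy]
  | cons y ys ih =>
    have hgx : g x = k (h x) := hx x (Or.inl rfl)
    have hgy : g y = k (h y) := hx y (Or.inr (List.mem_cons_self ..))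
    simp only [PySem.List.insertBy, hgx, hgy]
    split
    case isTrue h1 => simp [PySem.List.insertBy, h1]
    case isFalse h1 =>
      simp only [List.map_cons, PySem.List.insertBy, if_neg h1]
      rw [ih (fun a ha => hx a (by rcases ha with h1 | h2; exact Or.inl h1; exact Or.inr (List.mem_cons_of_mem _ h2)))]

theorem map_foldl_insertBy {α : Type} (g : Int → Int) (k : α → Int) (h : Int → α)
    (idxs acc : List Int) (hok : ∀ a, a ∈ idxs ∨ a ∈ acc → g a = k (h a)) :
    (idxs.foldl (fun acc x => PySem.List.insertBy (fun a b => decide (g a < g b)) x acc) acc).map h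
      = (idxs.map h).foldl (fun acc x => PySem.List.insertBy (fun a b => decide (k a < k b)) x acc) (acc.map h) := by
  induction idxs generalizing acc with
  | nil => simp
  | cons i idxs ih =>
    simp only [List.foldl_cons, List.map_cons]
    rw [← map_insertBy g k h i acc
      (fun a ha => hok a (by rcases ha with h1 | h2; exact Or.inl (h1 ▸ List.mem_cons_self ..); exact Or.inr h2))]
    exact ih _ (fun a ha => by
      rcases ha with h1 | h2
      · exact hok a (Or.inl (List.mem_cons_of_mem _ h1))
      · rcases (PySem.List.mem_insertBy _ _ _ _).mp h2 with h3 | h4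
        · exact hok a (Or.inl (h3 ▸ List.mem_cons_self ..))
        · exact hok a (Or.inr h4))

-- the argsort-then-gather of A equals a direct stable sort by the key
theorem argsort_gather {α : Type} [Inhabited α] (l : List α) (f : α → Int) (d : Int) (d' : α) :
    (PySem.List.sorted (PySem.List.pyRange 0 (PySem.List.len (l.map f)))
        (fun x => PySem.List.pyGetD (l.map f) x d)).map (fun idx => PySem.List.pyGetD l idx d')
      = PySem.List.sorted l f := by
  have hlen : PySem.List.len (l.map f) = (l.length : Int) := by simp [PySem.List.len]
  rw [hlen, PySem.List.sorted_eq_foldl_insertBy, PySem.List.sorted_eq_foldl_insertBy]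
  rw [map_foldl_insertBy (fun x => PySem.List.pyGetD (l.map f) x d) f (fun idx => PySem.List.pyGetD l idx d')]
  · have : (PySem.List.pyRange 0 ((l.length : Int))).map (fun idx => PySem.List.pyGetD l idx d') = l := by
      have := PySem.List.map_pyGetD_pyRange_zero l d'
      simpa [PySem.List.len] using this
    rw [this]; simp
  · intro a ha
    rcases ha with ha | ha
    · have hb := PySem.List.mem_pyRange_one.mp ha
      obtain ⟨j, rfl⟩ : ∃ j : Nat, a = (j : Int) := ⟨a.toNat, (Int.toNat_of_nonneg hb.1).symm⟩
      have hj : j < l.length := by exact_mod_cast hb.2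
      rw [PySem.List.pyGetD_natCast, PySem.List.pyGetD_natCast]
      rw [List.getD_eq_getElem _ _ (by simpa using hj), List.getD_eq_getElem _ _ hj]
      simp
    · simp at ha

-- skip a block none of whose elements x precedes
theorem insertBy_append_skip {a : Type} (before : a -> a -> Bool) (x : a) (b rest : List a)
    (h : ∀ y ∈ b, before x y = false) :
    PySem.List.insertBy before x (b ++ rest) = b ++ PySem.List.insertBy before x rest := by
  induction b with
  | nil => simp
  | cons y b ih =>
    simp only [List.cons_append, PySem.List.insertBy]
    rw [if_neg (by simp [h y (List.mem_cons_self ..)])]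
    rw [ih (fun z hz => h z (List.mem_cons_of_mem _ hz))]

-- x precedes everything: it goes to the front
theorem insertBy_all_after {a : Type} (before : a -> a -> Bool) (x : a) (ys : List a)
    (h : ∀ y ∈ ys, before x y = true) :
    PySem.List.insertBy before x ys = x :: ys := by
  cases ys with
  | nil => rfl
  | cons y t => simp [PySem.List.insertBy, h y (List.mem_cons_self ..)]

-- one stable-insertion step lands at the end of x's own bucket (x's key already present)
theorem insertBy_flatMap_mem (x : String) (K : List Int)
    (hK : K.Pairwise (fun a b => a < b)) (g : Int → List String)
    (hg : ∀ k a, a ∈ g k → chrom_key a = k) (hx : chrom_key x ∈ K) :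
    PySem.List.insertBy (fun a b => decide (chrom_key a < chrom_key b)) x (K.flatMap g)
      = K.flatMap (fun k => if k = chrom_key x then g k ++ [x] else g k) := by
  induction K with
  | nil => simp at hx
  | cons k K ih =>
    have hKlt : ∀ k' ∈ K, k < k' := (List.pairwise_cons.mp hK).1
    by_cases hk : k = chrom_key x
    · simp only [List.flatMap_cons]
      rw [insertBy_append_skip _ _ _ _ (fun a ha => by simp [hg k a ha, hk]),
        insertBy_all_after _ _ _ (fun a ha => by
          obtain ⟨k', hk', ha'⟩ := List.mem_flatMap.mp ha
          have h1 := hKlt k' hk'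
          have h2 := hg k' a ha'
          simp [h2, ← hk]; omega),
        if_pos hk,
        List.flatMap_congr (fun k' hk' => if_neg (by have := hKlt k' hk'; omega))]
      simp
    · have hx' : chrom_key x ∈ K := by
        rcases List.mem_cons.mp hx with h1 | h1
        · exact absurd h1.symm hk
        · exact h1
      have hklt : k < chrom_key x := hKlt _ hx'
      simp only [List.flatMap_cons]
      rw [insertBy_append_skip _ _ _ _ (fun a ha => by simp [hg k a ha]; omega),
        ih (List.pairwise_cons.mp hK).2 hx',
        if_neg hk]

-- one stable-insertion step opens a fresh singleton bucket (x's key absent)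
theorem insertBy_flatMap_not_mem (x : String) (K : List Int)
    (hK : K.Pairwise (fun a b => a < b)) (g : Int → List String)
    (hg : ∀ k a, a ∈ g k → chrom_key a = k) (hx : chrom_key x ∉ K) :
    PySem.List.insertBy (fun a b => decide (chrom_key a < chrom_key b)) x (K.flatMap g)
      = (PySem.List.insertBy (fun a b => decide (a < b)) (chrom_key x) K).flatMap
          (fun k => if k = chrom_key x then [x] else g k) := by
  induction K with
  | nil => simp [PySem.List.insertBy]
  | cons k K ih =>
    have hKlt : ∀ k' ∈ K, k < k' := (List.pairwise_cons.mp hK).1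
    have hk : k ≠ chrom_key x := fun h => hx (h ▸ List.mem_cons_self ..)
    by_cases hlt : chrom_key x < k
    · rw [insertBy_all_after _ _ _ (fun a ha => by
        obtain ⟨k', hk', ha'⟩ := List.mem_flatMap.mp ha
        have h2 := hg k' a ha'
        rcases List.mem_cons.mp hk' with h1 | h1
        · simp [h2, h1]; omega
        · have := hKlt k' h1; simp [h2]; omega)]
      rw [show PySem.List.insertBy (fun a b => decide (a < b)) (chrom_key x) (k :: K)
            = chrom_key x :: k :: K by simp [PySem.List.insertBy, hlt]]
      simp only [List.flatMap_cons]
      rw [if_neg hk,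
        List.flatMap_congr (fun k' hk' => if_neg (fun h => hx (List.mem_cons_of_mem _ (by rw [← h]; exact hk'))))]
      simp
    · have hklt : k < chrom_key x := by omega
      simp only [List.flatMap_cons]
      rw [insertBy_append_skip _ _ _ _ (fun a ha => by simp [hg k a ha]; omega),
        ih (List.pairwise_cons.mp hK).2 (fun h => hx (List.mem_cons_of_mem _ h))]
      rw [show PySem.List.insertBy (fun a b => decide (a < b)) (chrom_key x) (k :: K)
            = k :: PySem.List.insertBy (fun a b => decide (a < b)) (chrom_key x) K by
          simp [PySem.List.insertBy, hlt]]
      simp only [List.flatMap_cons]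
      rw [if_neg hk]

-- appending an already-seen value leaves the ordered distinct list unchanged
theorem ofList_snoc_mem (xs : List Int) (y : Int) (hy : y ∈ xs) :
    PySem.Set.ofList (xs ++ [y]) = PySem.Set.ofList xs := by
  show List.foldl PySem.Set.add PySem.Set.empty (xs ++ [y]) = _
  rw [List.foldl_append]
  show PySem.Set.add (PySem.Set.ofList xs) y = _
  unfold PySem.Set.add
  rw [if_pos (by
    have : y ∈ PySem.Set.ofList xs := (PySem.Set.mem_ofList xs y).mpr hy
    simpa [PySem.Set.contains] using this)]

-- appending a fresh value: its sorted distinct keys gain one insertion step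
theorem sorted_ofList_snoc_not_mem (xs : List Int) (y : Int) (hy : y ∉ xs) :
    PySem.List.sorted (PySem.Set.ofList (xs ++ [y])) (fun k => k)
      = PySem.List.insertBy (fun a b => decide (a < b)) y
          (PySem.List.sorted (PySem.Set.ofList xs) (fun k => k)) := by
  have hnm : y ∉ PySem.Set.ofList xs := fun h => hy ((PySem.Set.mem_ofList xs y).mp h)
  have hofl : (PySem.Set.ofList (xs ++ [y]) : List Int) = PySem.Set.ofList xs ++ [y] := by
    show List.foldl PySem.Set.add PySem.Set.empty (xs ++ [y]) = _
    rw [List.foldl_append]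
    show PySem.Set.add (PySem.Set.ofList xs) y = _
    unfold PySem.Set.add
    rw [if_neg (by simpa [PySem.Set.contains] using hnm)]
  rw [hofl]
  apply PySem.List.sorted_eq_of_perm_of_pairwise_lt
  · refine (PySem.List.insertBy_perm _ _ _).trans ?_
    refine (List.Perm.cons y (PySem.List.sorted_perm _ _ _)).trans ?_
    exact (List.perm_append_singleton _ _).symm
  · have hle : List.Pairwise (fun a b : Int => a ≤ b)
        (PySem.List.insertBy (fun a b => decide (a < b)) y
          (PySem.List.sorted (PySem.Set.ofList xs) (fun k => k))) := by
      have := PySem.List.insertBy_pairwise_le (fun k : Int => k) y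
        (PySem.List.sorted (PySem.Set.ofList xs) (fun k => k))
        ((PySem.List.sorted_ofList_pairwise_lt xs).imp (fun h => le_of_lt h))
      simpa using this
    have hnd : (PySem.List.insertBy (fun a b => decide (a < b)) y
        (PySem.List.sorted (PySem.Set.ofList xs) (fun k => k))).Nodup := by
      apply (PySem.List.insertBy_perm _ _ _).nodup_iff.mpr
      refine List.nodup_cons.mpr ⟨fun h => hnm ((PySem.List.mem_sorted _ _ _ _).mp h), ?_⟩
      exact ((PySem.List.sorted_perm _ _ _).nodup_iff).mpr (PySem.Set.nodup_ofList xs)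
    exact (hle.and hnd).imp (fun h => lt_of_le_of_ne h.1 h.2)

-- the stable sort is the concatenation of the key buckets over the sorted distinct keys
theorem sorted_eq_buckets (l : List String) :
    PySem.List.sorted l chrom_key
      = (PySem.List.sorted (PySem.Set.ofList (l.map chrom_key)) (fun k => k)).flatMap
          (fun k => l.filter (fun s => decide (chrom_key s = k))) := by
  induction l using List.reverseRecOn with
  | nil => simp [PySem.List.sorted, PySem.Set.ofList, PySem.Set.empty]
  | append_singleton l x ih =>
    have hfold : PySem.List.sorted (l ++ [x]) chrom_key
        = PySem.List.insertBy (fun a b => decide (chrom_key a < chrom_key b)) x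
            (PySem.List.sorted l chrom_key) := by
      rw [PySem.List.sorted_eq_foldl_insertBy, PySem.List.sorted_eq_foldl_insertBy,
        List.foldl_append]
      rfl
    have hg : ∀ k a, a ∈ l.filter (fun s => decide (chrom_key s = k)) → chrom_key a = k := by
      intro k a ha
      simpa using (List.mem_filter.mp ha).2
    have hK := PySem.List.sorted_ofList_pairwise_lt (l.map chrom_key)
    have hmem : ∀ k : Int,
        (k ∈ PySem.List.sorted (PySem.Set.ofList (l.map chrom_key)) (fun k => k))
          ↔ k ∈ l.map chrom_key := by
      intro k
      rw [PySem.List.mem_sorted]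
      exact PySem.Set.mem_ofList _ _
    rw [hfold, ih, List.map_append]
    by_cases hx : chrom_key x ∈ l.map chrom_key
    · rw [insertBy_flatMap_mem x _ hK _ hg ((hmem _).mpr hx)]
      rw [show List.map chrom_key [x] = [chrom_key x] from rfl, ofList_snoc_mem _ _ hx]
      apply List.flatMap_congr
      intro k hk
      rw [List.filter_append]
      by_cases h : k = chrom_key x
      · rw [if_pos h]
        simp [List.filter, h.symm]
      · rw [if_neg h]
        simp [List.filter, decide_eq_false (fun hh : chrom_key x = k => h hh.symm)]
    · rw [insertBy_flatMap_not_mem x _ hK _ hg ((fun h => hx ((hmem _).mp h)))]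
      rw [show List.map chrom_key [x] = [chrom_key x] from rfl, sorted_ofList_snoc_not_mem _ _ hx]
      apply List.flatMap_congr
      intro k hk
      rw [List.filter_append]
      by_cases h : k = chrom_key x
      · rw [if_pos h]
        have hnil : l.filter (fun s => decide (chrom_key s = k)) = [] := by
          rw [List.filter_eq_nil_iff]
          intro a ha hcontra
          exact hx (h ▸ (by simpa using hcontra) ▸ List.mem_map_of_mem (f := chrom_key) ha)
        simp [hnil, List.filter, h.symm]
      · rw [if_neg h]
        simp [List.filter, decide_eq_false (fun hh : chrom_key x = k => h hh.symm)]

-- the grouping loop builds exactly the key buckets, keys in first-appearance order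
theorem dict_fold_spec (l : List String) (d : PySem.Dict Int (List String)) :
    (∀ k, (l.foldl bucket_step d).getD k [] = d.getD k [] ++ l.filter (fun s => decide (chrom_key s = k)))
    ∧ (l.foldl bucket_step d).keys = PySem.Set.update d.keys (l.map chrom_key) := by
  induction l generalizing d with
  | nil => simp [PySem.Set.update]
  | cons s l ih =>
    have hstep_getD : ∀ k, (bucket_step d s).getD k []
        = d.getD k [] ++ (if chrom_key s = k then [s] else []) := by
      intro k
      unfold bucket_step
      by_cases hk : chrom_key s = k
      · subst hk
        by_cases hc : d.contains (chrom_key s)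
        · rw [if_pos hc]; simp [PySem.Dict.getD_insert_self]
        · rw [if_neg hc]
          simp [PySem.Dict.getD_insert_self,
            PySem.Dict.getD_of_not_contains d [] (Bool.not_eq_true _ ▸ hc)]
      · by_cases hc : d.contains (chrom_key s)
        · rw [if_pos hc]; simp [PySem.Dict.getD_insert_of_ne _ _ _ (fun h => hk h.symm), hk]
        · rw [if_neg hc]; simp [PySem.Dict.getD_insert_of_ne _ _ _ (fun h => hk h.symm), hk]
    have hstep_keys : (bucket_step d s).keys = PySem.Set.add d.keys (chrom_key s) := by
      unfold bucket_step PySem.Set.add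
      by_cases hc : d.contains (chrom_key s) = true
      · rw [if_pos hc, PySem.Dict.keys_insert_of_contains d _ hc,
          if_pos (by
            have : chrom_key s ∈ d.keys := (PySem.Dict.contains_iff_mem_keys d _).mp hc
            simpa [PySem.Set.contains] using this)]
      · rw [if_neg hc, PySem.Dict.keys_insert_of_not_contains d _ (by simpa using hc),
          if_neg (by
            intro hmem
            exact hc ((PySem.Dict.contains_iff_mem_keys d _).mpr
              (by simpa [PySem.Set.contains] using hmem)))]
    refine ⟨fun k => ?_, ?_⟩
    · rw [List.foldl_cons, (ih (bucket_step d s)).1 k, hstep_getD k, List.filter_cons]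
      by_cases h : chrom_key s = k <;> simp [h]
    · rw [List.foldl_cons, (ih (bucket_step d s)).2, hstep_keys, List.map_cons]
      rfl

-- ===== VERDICT (by name: the statement is the Claim_ definition above) =====
theorem sort_chromosome_names_spec : Claim_equal_sort_chromosome_names := by
  intro l _
  show sort_chromosome_names l = sort_chromosome_names_alt l
  unfold sort_chromosome_names sort_chromosome_names_alt
  rw [show (fun (acc : List Int) (chrom0 : String) =>
      let chrom := PySem.Str.upper (PySem.Str.replace chrom0 "chr" "")
      let chrom_value : Int :=
        if chrom = "X" then 99
        else if chrom = "Y" then 100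
        else if chrom = "M" ∨ chrom = "MT" then 101
        else if chrom = "EBV" then 102
        else if chrom = "MISC_ALT_CONTIGS_SCMO" then 999
        else match PySem.Int.ofStr? chrom with
          | some v => v
          | none => 999 + (chrom.toList.map (fun c => (c.toNat : Int))).sum
      acc ++ [chrom_value]) = (fun acc x => acc ++ [chrom_key x]) from rfl]
  rw [PySem.List.foldl_append_singleton_eq_map, List.nil_append]
  rw [argsort_gather l chrom_key 0 ""]
  obtain ⟨hgetD, hkeys⟩ := dict_fold_spec l PySem.Dict.empty
  rw [PySem.List.foldl_append_eq_flatMap, List.nil_append, hkeys, PySem.Dict.keys_empty]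
  rw [show PySem.Set.update ([] : List Int) (l.map chrom_key) = PySem.Set.ofList (l.map chrom_key) from rfl]
  rw [List.flatMap_congr (fun k _ => by rw [hgetD k, PySem.Dict.getD_empty, List.nil_append])]
  exact sorted_eq_buckets l
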